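-- pv_equiv track=rewrite | github.com/AfLosada/spellchecker | spell_checker.py | transform_into_spanish
-- ===== SOURCE A (Python) =====
-- spanish_letters = ['ñ', 'á', 'é', 'í', 'ó', 'ú']
--
-- spanish_typo = ['n','a','e','i','o','u']
--
-- def transform_into_spanish(word):
--     words = []
--     for i in range(0, len(spanish_typo)):
--         possible_typo = spanish_typo[i]
--         for j in range(0, len(word)):
--             letter = word[j]
--             if letter == possible_typo:
--                 front = word[0: j]
--                 back = word[j+1: len(word)]
--                 temporal_word = front + spanish_letters[i] + back
--                 words.append(temporal_word)
--     return words
-- ===== SOURCE B (Python) =====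
-- spanish_letters = ['ñ', 'á', 'é', 'í', 'ó', 'ú']
--
-- spanish_typo = ['n','a','e','i','o','u']
--
-- def transform_into_spanish(word):
--     # one scan of the word builds an index letter -> ascending positions,
--     # then one grouped emission pass over the six (typo, accent) pairs
--     positions = {}
--     for j, ch in enumerate(word):
--         if ch in spanish_typo:
--             positions.setdefault(ch, []).append(j)
--     words = []
--     for typo, accent in zip(spanish_typo, spanish_letters):
--         for j in positions.get(typo, []):
--             words.append(word[:j] + accent + word[j+1:])
--     return words
-- ===== Notes on version B (the rewrite author's own statement) =====
-- stated objective: alternative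
-- what changed: Instead of six repeated scans of the word (one per typo letter), B scans the word once with enumerate to build a dict mapping each typo letter to its ascending positions, then emits the variants in a grouped pass over the six (typo, accent) pairs.
import Mathlib
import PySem

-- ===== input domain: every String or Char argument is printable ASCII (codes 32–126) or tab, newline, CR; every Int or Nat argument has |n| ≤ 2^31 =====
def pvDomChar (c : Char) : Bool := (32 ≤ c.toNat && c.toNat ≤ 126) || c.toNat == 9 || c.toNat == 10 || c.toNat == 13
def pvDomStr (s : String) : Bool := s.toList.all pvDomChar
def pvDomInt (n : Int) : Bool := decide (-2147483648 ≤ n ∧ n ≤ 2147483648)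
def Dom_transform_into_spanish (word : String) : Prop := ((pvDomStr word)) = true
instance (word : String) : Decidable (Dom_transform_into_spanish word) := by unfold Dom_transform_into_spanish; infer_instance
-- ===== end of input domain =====

-- B replaces A's six scans of the word by a single indexing scan plus a grouped emission pass (alternative decomposition; return value only).
-- ===== PORT A =====
def spanish_letters : List String := ["ñ", "á", "é", "í", "ó", "ú"]

def spanish_typo : List String := ["n", "a", "e", "i", "o", "u"]

def transform_into_spanish (word : String) : List String :=
  (PySem.List.pyRange 0 ((spanish_typo.length : Int))).foldl (fun words i =>
    let possible_typo := (PySem.List.pyGet? spanish_typo i).getD ""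
    (PySem.List.pyRange 0 (PySem.Str.len word)).foldl (fun words j =>
      let letter := String.ofList [(PySem.Str.pyGet? word j).getD ' ']
      if letter == possible_typo then
        let front := PySem.Str.slice word (some 0) (some j)
        let back := PySem.Str.slice word (some (j + 1)) (some (PySem.Str.len word))
        let temporal_word := front ++ (PySem.List.pyGet? spanish_letters i).getD "" ++ back
        words ++ [temporal_word]
      else words) words) []

-- ===== PORT B =====
def transform_into_spanish_alt (word : String) : List String :=
  let positions : PySem.Dict String (List Int) :=
    (PySem.List.enumerate word.toList).foldl (fun d jc =>
      let ch := String.ofList [jc.2]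
      if spanish_typo.contains ch then
        d.modify ch [] (fun l => l ++ [jc.1])
      else d) PySem.Dict.empty
  (spanish_typo.zip spanish_letters).foldl (fun words ta =>
    (positions.getD ta.1 []).foldl (fun words j =>
      words ++ [PySem.Str.slice word none (some j) ++ ta.2 ++ PySem.Str.slice word (some (j + 1)) none]) words) []

-- ===== PRECONDITION & SPEC =====
def Spec_transform_into_spanish (word : String) (out : List String) : Prop := out = transform_into_spanish_alt word
instance (word : String) (out : List String) : Decidable (Spec_transform_into_spanish word out) := by unfold Spec_transform_into_spanish; infer_instance

-- ===== CLAIM (what is proved, stated in full; the proofs are below) =====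
def Claim_equal_transform_into_spanish : Prop := ∀ (word : String), Dom_transform_into_spanish word → Spec_transform_into_spanish word (transform_into_spanish word)

-- ===== LEMMAS AND PROOFS =====

def pvEmit (word t a : String) : List String :=
  ((List.range word.toList.length).filter
      (fun k => String.ofList [word.toList.getD k ' '] == t)).map
    (fun (k : Nat) => PySem.Str.slice word none (some ((k : Nat) : Int)) ++ a ++
      PySem.Str.slice word (some (((k : Nat) : Int) + 1)) none)

theorem pvSlice_front (word : String) (j : Int) :
    PySem.Str.slice word (some 0) (some j) = PySem.Str.slice word none (some j) := by
  rw [PySem.Str.slice.eq_1, PySem.Str.slice.eq_1, PySem.Chars.slice_eq_listSlice,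
    PySem.Chars.slice_eq_listSlice, PySem.List.slice_zero_start]

theorem pvSlice_back (word : String) (k : Nat) :
    PySem.Str.slice word (some ((k : Int) + 1)) (some (word.toList.length : Int))
      = PySem.Str.slice word (some ((k : Int) + 1)) none := by
  rw [PySem.Str.slice.eq_1, PySem.Str.slice.eq_1, PySem.Chars.slice_eq_listSlice,
    PySem.Chars.slice_eq_listSlice]
  have h : ((k : Int) + 1) = ((k + 1 : Nat) : Int) := by push_cast; ring
  rw [h, PySem.List.slice_natCast, PySem.List.slice_from_natCast]
  exact congrArg String.ofList (List.take_of_length_le (by simp))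

theorem pvA_inner (word t a : String) (acc : List String) :
    (PySem.List.pyRange 0 (PySem.Str.len word)).foldl
      (fun words j =>
        let letter := String.ofList [(PySem.Str.pyGet? word j).getD ' ']
        if letter == t then
          let front := PySem.Str.slice word (some 0) (some j)
          let back := PySem.Str.slice word (some (j + 1)) (some (PySem.Str.len word))
          let temporal_word := front ++ a ++ back
          words ++ [temporal_word]
        else words) acc
    = acc ++ pvEmit word t a := by
  simp only [PySem.Str.len_eq, PySem.List.pyRange_zero_natCast]
  rw [PySem.List.foldl_append_if
    (p := fun j => String.ofList [(PySem.Str.pyGet? word j).getD ' '] == t)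
    (f := fun j => PySem.Str.slice word (some 0) (some j) ++ a ++
      PySem.Str.slice word (some (j + 1)) (some (word.toList.length : Int)))]
  congr 1
  rw [List.filter_map, List.map_map, pvEmit]
  have hf : ∀ k : Nat,
      (String.ofList [(PySem.Str.pyGet? word (k : Int)).getD ' '] == t)
        = (String.ofList [word.toList.getD k ' '] == t) := by
    intro k
    simp [List.getD]
  rw [List.filter_congr (by intro k _; exact hf k)]
  apply List.map_congr_left
  intro k _
  simp only [Function.comp]
  rw [pvSlice_front, pvSlice_back]

theorem pvDict_getD (t : String) (ht : t ∈ spanish_typo) (l : List (Int × Char))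
    (d : PySem.Dict String (List Int)) :
    (l.foldl (fun d jc =>
        let ch := String.ofList [jc.2]
        if spanish_typo.contains ch then
          d.modify ch [] (fun l => l ++ [jc.1])
        else d) d).getD t []
      = d.getD t [] ++ (l.filter (fun jc => String.ofList [jc.2] == t)).map Prod.fst := by
  induction l generalizing d with
  | nil => simp
  | cons hd tl ih =>
    simp only [List.foldl_cons, List.filter_cons]
    by_cases hct : String.ofList [hd.2] = t
    · rw [hct]
      have hc : spanish_typo.contains t = true := by
        simpa [List.contains_iff_mem] using ht
      simp only [hc, beq_self_eq_true, if_true, ih,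
        PySem.Dict.getD_modify_self, List.map_cons]
      simp
    · have hbeq : (String.ofList [hd.2] == t) = false := by
        simpa using hct
      simp only [hbeq, Bool.false_eq_true, if_false]
      by_cases hc : spanish_typo.contains (String.ofList [hd.2]) = true
      · simp only [hc, if_true, ih, PySem.Dict.getD_modify_of_ne _ _ _ (Ne.symm hct)]
      · simp only [hc, ih]
        simp

theorem pvB_inner (word t a : String) (ht : t ∈ spanish_typo) (acc : List String) :
    ((((PySem.List.enumerate word.toList).foldl (fun d jc =>
        let ch := String.ofList [jc.2]
        if spanish_typo.contains ch then
          d.modify ch [] (fun l => l ++ [jc.1])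
        else d) PySem.Dict.empty).getD t []).foldl
      (fun words j =>
        words ++ [PySem.Str.slice word none (some j) ++ a ++
          PySem.Str.slice word (some (j + 1)) none]) acc)
      = acc ++ pvEmit word t a := by
  rw [pvDict_getD t ht, PySem.Dict.getD_empty, List.nil_append,
    PySem.List.foldl_append_singleton_eq_map]
  congr 1
  rw [PySem.List.enumerate_eq_map_pyRange word.toList ' ', PySem.List.len_eq,
    PySem.List.pyRange_zero_natCast, pvEmit]
  simp only [List.map_map, List.filter_map]
  rw [List.filter_congr (l := List.range word.toList.length)
    (q := fun k => String.ofList [word.toList.getD k ' '] == t) (by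
      intro k _
      simp [PySem.List.pyGetD_natCast])]
  apply List.map_congr_left
  intro k _
  rfl

theorem pvMain (word : String) : transform_into_spanish word = transform_into_spanish_alt word := by
  unfold transform_into_spanish transform_into_spanish_alt
  have hr : PySem.List.pyRange 0 ((spanish_typo.length : Int)) = [0, 1, 2, 3, 4, 5] := by decide
  have hz : spanish_typo.zip spanish_letters =
      [("n", "ñ"), ("a", "á"), ("e", "é"), ("i", "í"), ("o", "ó"), ("u", "ú")] := by decide
  rw [hr, hz]
  simp only [List.foldl_cons, List.foldl_nil]
  rw [pvB_inner word "n" "ñ" (by decide), pvB_inner word "a" "á" (by decide),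
    pvB_inner word "e" "é" (by decide), pvB_inner word "i" "í" (by decide),
    pvB_inner word "o" "ó" (by decide), pvB_inner word "u" "ú" (by decide)]
  simp only [show (PySem.List.pyGet? spanish_typo 0).getD "" = "n" from by decide,
    show (PySem.List.pyGet? spanish_letters 0).getD "" = "ñ" from by decide,
    show (PySem.List.pyGet? spanish_typo 1).getD "" = "a" from by decide,
    show (PySem.List.pyGet? spanish_letters 1).getD "" = "á" from by decide,
    show (PySem.List.pyGet? spanish_typo 2).getD "" = "e" from by decide,
    show (PySem.List.pyGet? spanish_letters 2).getD "" = "é" from by decide,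
    show (PySem.List.pyGet? spanish_typo 3).getD "" = "i" from by decide,
    show (PySem.List.pyGet? spanish_letters 3).getD "" = "í" from by decide,
    show (PySem.List.pyGet? spanish_typo 4).getD "" = "o" from by decide,
    show (PySem.List.pyGet? spanish_letters 4).getD "" = "ó" from by decide,
    show (PySem.List.pyGet? spanish_typo 5).getD "" = "u" from by decide,
    show (PySem.List.pyGet? spanish_letters 5).getD "" = "ú" from by decide]
  rw [pvA_inner word "n" "ñ", pvA_inner word "a" "á", pvA_inner word "e" "é",
    pvA_inner word "i" "í", pvA_inner word "o" "ó", pvA_inner word "u" "ú"]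

-- ===== VERDICT (by name: the statement is the Claim_ definition above) =====
theorem transform_into_spanish_spec : Claim_equal_transform_into_spanish := by
  intro word _
  unfold Spec_transform_into_spanish
  exact pvMain word
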